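-- pv_equiv track=rewrite | github.com/YooJin919/coding-test-study | Implementation/programmers-85924.py | solution
-- ===== SOURCE A (Python) =====
-- def solution(string, skip, index):
--     answer = ''
--     skip = list(skip)
--
--     for s in string:
--         i = index
--
--         while i:
--             s = chr(ord(s) + 1)
--
--             if ord(s) == 123:
--                 s = 'a'
--
--             if s in skip:
--                 continue
--
--             i -= 1
--         answer += s
--
--     return answer
-- ===== SOURCE B (Python) =====
-- def solution(string, skip, index):
--     if index == 0:
--         return string
--     banned = set(skip)
--     wheel = [chr(d) for d in range(97, 123) if chr(d) not in banned]
--     out = []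
--     for ch in string:
--         ramp = [chr(d) for d in range(ord(ch) + 1, 123) if chr(d) not in banned]
--         if index <= len(ramp):
--             out.append(ramp[index - 1])
--         else:
--             out.append(wheel[(index - len(ramp) - 1) % len(wheel)])
--     return ''.join(out)
-- ===== Notes on version B (the rewrite author's own statement) =====
-- stated objective: faster
-- what changed: A advances each character one code point at a time, taking index productive steps per character (re-stepping past skip letters); B precomputes the allowed alphabet once and jumps each character directly to its target: the remaining allowed letters up to 'z' (the ramp) by position, or the allowed wheel by modular index (index 0 is the identity). …
-- outside the precondition, e.g. on solution('{', '', 1): A returns '|', B returns 'a'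
import Mathlib
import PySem

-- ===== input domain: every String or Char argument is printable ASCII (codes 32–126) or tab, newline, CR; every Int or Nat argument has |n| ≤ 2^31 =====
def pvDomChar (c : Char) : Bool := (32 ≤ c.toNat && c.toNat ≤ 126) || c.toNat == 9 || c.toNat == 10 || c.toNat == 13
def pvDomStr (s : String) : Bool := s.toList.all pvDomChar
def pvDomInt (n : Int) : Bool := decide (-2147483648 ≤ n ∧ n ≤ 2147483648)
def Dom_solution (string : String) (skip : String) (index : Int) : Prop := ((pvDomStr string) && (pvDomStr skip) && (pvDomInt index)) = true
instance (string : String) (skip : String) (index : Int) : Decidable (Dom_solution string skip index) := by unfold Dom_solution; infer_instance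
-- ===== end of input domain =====

-- B replaces A's per-character unit-step simulation (index productive steps per character) by a
-- direct indexed jump into the precomputed allowed alphabet: asymptotically faster in index.
-- Characters are modelled by their code points (Python ord/chr are explicit in both programs).

-- ===== PORT A =====
-- one raw increment of A's inner loop: s = chr(ord(s)+1); if ord(s) == 123: s = 'a'
def pvStep (s : Nat) : Nat := if s + 1 = 123 then 97 else s + 1

-- A's inner 'while i:' loop, fuel-guarded only to be total in Lean (the fuel used by
-- `solution` is provably sufficient on Pre_; `none` = the loop did not finish).
def pvWhileA (skip : List Nat) : Nat → Nat → Nat → Option Nat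
  | _, 0, s => some s
  | 0, _+1, _ => none
  | f+1, i+1, s =>
    let t := pvStep s
    if t ∈ skip then pvWhileA skip f (i+1) t else pvWhileA skip f i t

def solution (string : String) (skip : String) (index : Int) : String :=
  let skipL := skip.toList.map Char.toNat       -- skip = list(skip)
  String.ofList (string.toList.map (fun ch =>   -- for s in string: … answer += s
    Char.ofNat ((pvWhileA skipL (26 * index.toNat + 130) index.toNat ch.toNat).getD ch.toNat)))

-- ===== PORT B =====
def solution_alt (string : String) (skip : String) (index : Int) : String :=
  if index = 0 then string else
  let skipL := skip.toList.map Char.toNat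
  let wheel := (List.range' 97 26).filter (fun d => decide (d ∉ skipL))
  String.ofList (string.toList.map (fun ch =>
    let ramp := (List.range' (ch.toNat + 1) (122 - ch.toNat)).filter (fun d => decide (d ∉ skipL))
    Char.ofNat (if index.toNat ≤ ramp.length then ramp.getD (index.toNat - 1) 0
      else wheel.getD ((index.toNat - ramp.length - 1) % wheel.length) 0)))

-- ===== PRECONDITION & SPEC =====
-- Pre_ restricts to the cipher's domain: a positive step count and characters at most 'z'.
-- Outside it: a negative index makes A loop forever; characters above 'z' leave the alphabet entirely — A climbs raw code points without
-- ever wrapping, raising ValueError past the Unicode range and returning lone surrogates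
-- (not values of Char) in between, and for the few small indices where it does return a
-- printable value that value is as unspecified as any other; and a character whose remaining
-- climb cannot supply index allowed letters (skip covering the whole alphabet) makes A loop
-- forever. An empty string and a zero index are always admitted (both programs return the
-- string unchanged there).
def Pre_solution (string : String) (skip : String) (index : Int) : Prop :=
  string = "" ∨ index = 0 ∨
  1 ≤ index ∧
  (string.toList.all (fun c =>
    decide (c.toNat ≤ 122) &&
    (decide (index.toNat ≤ (List.range' (c.toNat + 1) (122 - c.toNat)).countP
        (fun d => decide (d ∉ skip.toList.map Char.toNat)))
      || decide (0 < (List.range' 97 26).countP (fun d => decide (d ∉ skip.toList.map Char.toNat)))))) = true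

instance (string : String) (skip : String) (index : Int) : Decidable (Pre_solution string skip index) := by
  unfold Pre_solution; infer_instance

def pvWitness_solution : String × String × Int := ("ab", "b", 2)

def Spec_solution (string : String) (skip : String) (index : Int) (out : String) : Prop := out = solution_alt string skip index
instance (string : String) (skip : String) (index : Int) (out : String) : Decidable (Spec_solution string skip index out) := by unfold Spec_solution; infer_instance

-- ===== CLAIM (what is proved, stated in full; the proofs are below) =====
def Claim_equal_solution : Prop := ∀ (string : String) (skip : String) (index : Int), Dom_solution string skip index → Pre_solution string skip index → Spec_solution string skip index (solution string skip index)

-- ===== LEMMAS AND PROOFS =====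

-- the list of raw codes A's pointer visits in f raw increments from s
def pvClimb (s : Nat) : Nat → List Nat
  | 0 => []
  | f + 1 => pvStep s :: pvClimb (pvStep s) f

theorem pvClimb_append (a : Nat) : ∀ (s b : Nat),
    pvClimb s (a + b) = pvClimb s a ++ pvClimb (pvStep^[a] s) b := by
  induction a with
  | zero => intro s b; simp [pvClimb]
  | succ a ih =>
    intro s b
    rw [show a + 1 + b = (a + b) + 1 from by omega]
    simp only [pvClimb, Function.iterate_succ_apply, List.cons_append]
    rw [ih (pvStep s) b]

theorem pvClimb_ramp : ∀ (n s : Nat), s + n ≤ 122 →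
    pvClimb s n = List.range' (s + 1) n ∧ pvStep^[n] s = s + n := by
  intro n
  induction n with
  | zero => intro s _; simp [pvClimb]
  | succ n ih =>
    intro s h
    have hst : pvStep s = s + 1 := by unfold pvStep; rw [if_neg (by omega)]
    have := ih (s + 1) (by omega)
    refine ⟨?_, ?_⟩
    · simp only [pvClimb, hst, List.range'_succ, this.1]
    · rw [Function.iterate_succ_apply, hst, this.2]; omega

theorem pvStep_cyc : pvStep^[26] 122 = 122 := by decide

theorem pvClimb_cycle : ∀ K : Nat, pvClimb 122 (26 * K) = (List.replicate K (List.range' 97 26)).flatten := by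
  intro K
  induction K with
  | zero => simp [pvClimb]
  | succ K ih =>
    rw [show 26 * (K + 1) = 26 + 26 * K from by ring]
    rw [pvClimb_append, pvStep_cyc, ih]
    rw [show pvClimb 122 26 = List.range' 97 26 from by decide]
    simp [List.replicate_succ]

theorem pvClimb_decomp (c K : Nat) (hc : c ≤ 122) :
    pvClimb c ((122 - c) + 26 * K) =
      List.range' (c + 1) (122 - c) ++ (List.replicate K (List.range' 97 26)).flatten := by
  rw [pvClimb_append]
  have h := pvClimb_ramp (122 - c) c (by omega)
  rw [h.1, h.2, show c + (122 - c) = 122 from by omega, pvClimb_cycle]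

theorem pvWhileA_zero (skip : List Nat) (f s : Nat) : pvWhileA skip f 0 s = some s := by
  cases f <;> rfl

theorem pvWhileA_eq_filter (skip : List Nat) :
    ∀ f s i, i + 1 ≤ ((pvClimb s f).filter (fun d => decide (d ∉ skip))).length →
      pvWhileA skip f (i + 1) s = ((pvClimb s f).filter (fun d => decide (d ∉ skip)))[i]? := by
  intro f
  induction f with
  | zero => intro s i h; simp [pvClimb] at h
  | succ f ih =>
    intro s i h
    by_cases hm : pvStep s ∈ skip
    · rw [pvClimb, List.filter_cons_of_neg (by simp [hm])] at h ⊢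
      rw [show pvWhileA skip (f+1) (i+1) s = pvWhileA skip f (i+1) (pvStep s) from by
        simp [pvWhileA, hm]]
      exact ih (pvStep s) i h
    · rw [pvClimb, List.filter_cons_of_pos (by simp [hm])] at h ⊢
      rw [show pvWhileA skip (f+1) (i+1) s = pvWhileA skip f i (pvStep s) from by
        simp [pvWhileA, hm]]
      cases i with
      | zero => rw [pvWhileA_zero]; simp
      | succ j =>
        rw [ih (pvStep s) j (by simpa using h)]
        simp

theorem pvWhileA_mono_succ (skip : List Nat) :
    ∀ f i s r, pvWhileA skip f i s = some r → pvWhileA skip (f + 1) i s = some r := by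
  intro f
  induction f with
  | zero =>
    intro i s r h
    cases i with
    | zero => simpa [pvWhileA] using h
    | succ j => simp [pvWhileA] at h
  | succ f ih =>
    intro i s r h
    cases i with
    | zero => simpa [pvWhileA] using h
    | succ j =>
      simp only [pvWhileA] at h ⊢
      by_cases hm : pvStep s ∈ skip
      · simp only [hm, if_true] at h ⊢; exact ih _ _ _ h
      · simp only [hm, if_false] at h ⊢; exact ih _ _ _ h

theorem pvWhileA_mono (skip : List Nat) {f g i s : Nat} {r : Nat} (hfg : f ≤ g)
    (h : pvWhileA skip f i s = some r) : pvWhileA skip g i s = some r := by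
  induction g with
  | zero => cases Nat.le_zero.mp hfg; exact h
  | succ g ih =>
    rcases Nat.lt_or_ge f (g+1) with hl | hg
    · exact pvWhileA_mono_succ skip g i s r (ih (by omega))
    · cases Nat.le_antisymm hfg hg; exact h

theorem pvFilter_flatten_replicate (P : Nat → Bool) (K : Nat) (l : List Nat) :
    ((List.replicate K l).flatten).filter P = (List.replicate K (l.filter P)).flatten := by
  induction K with
  | zero => simp
  | succ K ih => simp [List.replicate_succ, List.filter_append, ih]

theorem pvFlatten_replicate_getElem? (F : List Nat) (_hm : 0 < F.length) :
    ∀ K j, j < K * F.length → ((List.replicate K F).flatten)[j]? = F[j % F.length]? := by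
  intro K
  induction K with
  | zero => intro j h; omega
  | succ K ih =>
    intro j h
    have hex : (K + 1) * F.length = K * F.length + F.length := by ring
    rw [List.replicate_succ, List.flatten_cons]
    by_cases hj : j < F.length
    · rw [List.getElem?_append_left hj, Nat.mod_eq_of_lt hj]
    · rw [List.getElem?_append_right (by omega)]
      have hle : F.length ≤ j := by omega
      rw [ih (j - F.length) (by omega), Nat.mod_eq_sub_mod hle]

-- A's inner loop, characterised as B's direct jump (for a character at most 'z')
theorem pvChar (skip : List Nat) (c n : Nat) (hc : c ≤ 122) (hn : 1 ≤ n)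
    (hterm : n ≤ ((List.range' (c + 1) (122 - c)).filter (fun d => decide (d ∉ skip))).length
      ∨ 0 < ((List.range' 97 26).filter (fun d => decide (d ∉ skip))).length) :
    pvWhileA skip (26 * n + 130) n c =
      some (if n ≤ ((List.range' (c + 1) (122 - c)).filter (fun d => decide (d ∉ skip))).length then
          ((List.range' (c + 1) (122 - c)).filter (fun d => decide (d ∉ skip))).getD (n - 1) 0
        else ((List.range' 97 26).filter (fun d => decide (d ∉ skip))).getD
          ((n - ((List.range' (c + 1) (122 - c)).filter (fun d => decide (d ∉ skip))).length - 1) %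
            ((List.range' 97 26).filter (fun d => decide (d ∉ skip))).length) 0) := by
  set P : Nat → Bool := fun d => decide (d ∉ skip) with hP
  set F : List Nat := (List.range' 97 26).filter P with hF
  set m : Nat := F.length with hmdef
  set L : List Nat := (List.range' (c + 1) (122 - c)).filter P with hL
  have hdec := pvClimb_decomp c n hc
  have hfiltered : (pvClimb c ((122 - c) + 26 * n)).filter P
      = L ++ (List.replicate n F).flatten := by
    rw [hdec, List.filter_append, pvFilter_flatten_replicate]
  have hflatlen : ((List.replicate n F).flatten).length = n * m := by
    simp [List.length_flatten, List.map_replicate, List.sum_replicate]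
    omega
  have hlen : n ≤ ((pvClimb c ((122 - c) + 26 * n)).filter P).length := by
    rw [hfiltered, List.length_append, hflatlen]
    rcases hterm with h | h
    · omega
    · have := Nat.le_mul_of_pos_right n h
      omega
  have hmain := pvWhileA_eq_filter skip ((122 - c) + 26 * n) c (n - 1)
  rw [show n - 1 + 1 = n from by omega] at hmain
  have hmain := hmain hlen
  rw [hfiltered] at hmain
  by_cases hcase : n ≤ L.length
  · rw [if_pos hcase]
    rw [List.getElem?_append_left (by omega), List.getElem?_eq_getElem (by omega)] at hmain
    rw [List.getD_eq_getElem?_getD, List.getElem?_eq_getElem (by omega)]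
    exact pvWhileA_mono skip (by omega) hmain
  · rw [if_neg hcase]
    have hm : 0 < m := by rcases hterm with h | h; omega; omega
    have hmul := Nat.le_mul_of_pos_right n hm
    have hmm : n * m = n * F.length := by rw [hmdef]
    rw [List.getElem?_append_right (by omega),
      pvFlatten_replicate_getElem? F (by omega) n (n - 1 - L.length) (by omega)] at hmain
    rw [show n - L.length - 1 = n - 1 - L.length from by omega]
    rw [List.getD_eq_getElem?_getD, List.getElem?_eq_getElem (Nat.mod_lt _ (by omega))]
    rw [List.getElem?_eq_getElem (Nat.mod_lt _ (by omega))] at hmain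
    exact pvWhileA_mono skip (by omega) hmain

-- ===== VERDICT (by name: the statement is the Claim_ definition above) =====
theorem solution_spec : Claim_equal_solution := by
  intro string skip index _hdom hpre
  unfold Spec_solution solution solution_alt
  rcases hpre with hemp | hz | ⟨hidx, hall⟩
  · subst hemp
    simp
  · rw [if_pos hz, hz]
    dsimp only
    rw [List.map_congr_left (fun ch _ => by
      rw [Int.toNat_zero, pvWhileA_zero, Option.getD_some, Char.ofNat_toNat])]
    simp
  · rw [if_neg (show ¬ index = 0 from by omega)]
    dsimp only
    congr 1
    apply List.map_congr_left
    intro ch hch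
    have h := List.all_eq_true.mp hall ch hch
    simp only [Bool.and_eq_true, Bool.or_eq_true, decide_eq_true_eq] at h
    obtain ⟨hc122, hterm⟩ := h
    rw [List.countP_eq_length_filter, List.countP_eq_length_filter] at hterm
    have hn : 1 ≤ index.toNat := by omega
    rw [pvChar (skip.toList.map Char.toNat) ch.toNat index.toNat hc122 hn hterm]
    rfl
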